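-- pv_equiv track=rewrite | github.com/forrester-aidan/Milestone2 | program4B.py | program4B
-- ===== SOURCE A (Python) =====
-- from typing import List, Tuple
--
-- def program4B(n: int, k: int, values: List[int]) -> Tuple[int, List[int]]:
--     """
--     Solution to Program 4B
--
--     Parameters:
--     n (int): number of vaults
--     k (int): no two chosen vaults are within k positions of each other
--     values (List[int]): the values of the vaults
--
--     Returns:
--     int:  maximal total value
--     List[int]: the indices of the chosen vaults(1-indexed)
--     """
--     ############################
--     # Add you code here
--     ############################
--
--     opt = [(0, [])] * n # DP table to store previous small subproblems
--
--     for i in range(n): # For every value in original array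
--         max_sum = 0
--         max_indices = []
--
--         # Traverse previous small subproblems
--         # If we're starting with the first index, this gets skipped always
--         # If the max_sum (our greatest sum of previous values) is less than the currently processed previous max sum:
--         #     Update max_sum, and grab a copy of the indexes that made that vault sum
--         for j in range(0, i - k):
--             if max_sum < opt[j][0]:
--                 max_sum = opt[j][0]
--                 max_indices = opt[j][1].copy()
--
--         # Decide on what to add in our optimal array
--         # If the optimal solution to the previous subproblem is greater than our current result:
--         #     Choose to store those values at opt[i] since they are the better solution
--         # Otherwise, add take the current vault, add the vaults value to the max_sum and index to max_indices.
--         #     Store this at opt[i]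
--         res = 0
--         if i > 0 and opt[i - 1][0] >= values[i] + max_sum:
--             res = (opt[i - 1][0], opt[i - 1][1])
--         else:
--             max_indices.append(i)
--             res = (values[i] + max_sum, max_indices)
--
--         opt[i] = (res[0], res[1])
--
--     # The optimal value will be present at the last index in the array, along with the 0-indexed indices
--     return opt[n - 1][0], [val + 1 for val in opt[n - 1][1]] # replace with your code
-- ===== SOURCE B (Python) =====
-- from typing import List, Tuple
--
-- def program4B(n: int, k: int, values: List[int]) -> Tuple[int, List[int]]:
--     # One pass: maintain the running best (sum, indices) over positions <= i-k-1
--     # incrementally instead of rescanning the whole prefix at every i.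
--     dp = []               # dp[i] = optimal (sum, 0-indexed picks) for the first i+1 vaults
--     best = (0, [])        # best positive-sum entry among dp[0 .. i-k-1]
--     for i in range(n):
--         j = i - k - 1
--         if j >= 0 and dp[j][0] > best[0]:
--             best = dp[j]
--         take = values[i] + best[0]
--         if i > 0 and dp[i - 1][0] >= take:
--             dp.append(dp[i - 1])
--         else:
--             dp.append((take, best[1] + [i]))
--     total, picks = dp[n - 1]
--     return total, [p + 1 for p in picks]
-- ===== Notes on version B (the rewrite author's own statement) =====
-- stated objective: faster
-- what changed: A rescans all earlier DP rows from scratch for every position i (nested loop); B makes a single pass that incrementally maintains the running best (sum, indices) over the admissible prefix, so the inner scan disappears.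
-- outside the precondition, e.g. on program4B(2, -1, [1, 1]): A returns (2, [1, 2]), B raises IndexError
import Mathlib
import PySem

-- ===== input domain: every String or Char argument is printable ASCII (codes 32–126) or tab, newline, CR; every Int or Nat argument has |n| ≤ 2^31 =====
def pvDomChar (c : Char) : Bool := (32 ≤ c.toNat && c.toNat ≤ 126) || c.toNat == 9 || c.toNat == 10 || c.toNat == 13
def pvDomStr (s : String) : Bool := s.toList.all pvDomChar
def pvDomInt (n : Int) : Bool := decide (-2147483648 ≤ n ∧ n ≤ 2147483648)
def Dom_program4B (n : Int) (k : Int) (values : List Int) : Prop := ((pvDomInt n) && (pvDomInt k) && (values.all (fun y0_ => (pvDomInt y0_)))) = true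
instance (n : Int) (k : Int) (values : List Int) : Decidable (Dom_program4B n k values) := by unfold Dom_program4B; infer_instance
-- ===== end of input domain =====

-- B replaces A's per-i rescan of all earlier DP rows by one incrementally maintained running
-- best over the admissible prefix (objective: faster; the O(n) inner scan disappears).

-- ===== PORT A =====

def pvStepMaxA (opt : List (Int × List Int)) (st : Int × List Int) (j : Int) : Int × List Int :=
  if st.1 < (PySem.List.pyGetD opt j (0, [])).1 then PySem.List.pyGetD opt j (0, []) else st

def pvScanA (opt : List (Int × List Int)) (t : Int) : Int × List Int :=
  (PySem.List.pyRange 0 t 1).foldl (pvStepMaxA opt) (0, [])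

def pvResA (values : List Int) (opt : List (Int × List Int)) (i : Int) (ms : Int × List Int) :
    Int × List Int :=
  if 0 < i ∧ (PySem.List.pyGetD opt (i - 1) (0, [])).1 ≥ PySem.List.pyGetD values i 0 + ms.1 then
    PySem.List.pyGetD opt (i - 1) (0, [])
  else
    (PySem.List.pyGetD values i 0 + ms.1, ms.2 ++ [i])

def pvBodyA (k : Int) (values : List Int) (opt : List (Int × List Int)) (i : Int) :
    List (Int × List Int) :=
  PySem.List.pySetD opt i (pvResA values opt i (pvScanA opt (i - k)))


def program4B (n : Int) (k : Int) (values : List Int) : Int × List Int :=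
  let opt := (PySem.List.pyRange 0 n 1).foldl (pvBodyA k values)
      (List.replicate n.toNat ((0 : Int), ([] : List Int)))
  ((PySem.List.pyGetD opt (n - 1) (0, [])).1,
   (PySem.List.pyGetD opt (n - 1) (0, [])).2.map (fun v => v + 1))

-- ===== PORT B =====
def pvAppendB (values : List Int) (i : Int) (dp : List (Int × List Int)) (best : Int × List Int) :
    List (Int × List Int) × (Int × List Int) :=
  (if 0 < i ∧ (PySem.List.pyGetD dp (i - 1) (0, [])).1 ≥ PySem.List.pyGetD values i 0 + best.1 then
     dp ++ [PySem.List.pyGetD dp (i - 1) (0, [])]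
   else
     dp ++ [(PySem.List.pyGetD values i 0 + best.1, best.2 ++ [i])], best)

def pvBodyB (k : Int) (values : List Int)
    (st : List (Int × List Int) × (Int × List Int)) (i : Int) :
    List (Int × List Int) × (Int × List Int) :=
  pvAppendB values i st.1
    (if 0 ≤ i - k - 1 ∧ st.2.1 < (PySem.List.pyGetD st.1 (i - k - 1) (0, [])).1 then
       PySem.List.pyGetD st.1 (i - k - 1) (0, [])
     else st.2)


def program4B_alt (n : Int) (k : Int) (values : List Int) : Int × List Int :=
  let dp := ((PySem.List.pyRange 0 n 1).foldl (pvBodyB k values) ([], (0, []))).1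
  ((PySem.List.pyGetD dp (n - 1) (0, [])).1,
   (PySem.List.pyGetD dp (n - 1) (0, [])).2.map (fun p => p + 1))

-- ===== PRECONDITION & SPEC =====
-- Pre_ excludes n < 1 and n > len(values), where A raises IndexError, and k < 0, which is
-- outside the task's natural domain (a negative minimum gap): there A raises IndexError for
-- k ≤ -2, and at k = -1 A's value comes from scanning not-yet-computed placeholder rows of
-- its preallocated table, which B's incrementally built table does not have (B raises
-- IndexError there) — see the cite in claim.json.
def Pre_program4B (n : Int) (k : Int) (values : List Int) : Prop :=
  1 ≤ n ∧ n ≤ (values.length : Int) ∧ 0 ≤ k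
instance (n : Int) (k : Int) (values : List Int) : Decidable (Pre_program4B n k values) := by
  unfold Pre_program4B; infer_instance

def pvWitness_program4B : Int × Int × List Int := (2, 1, [3, 5])

def Spec_program4B (n : Int) (k : Int) (values : List Int) (out : Int × List Int) : Prop :=
  out = program4B_alt n k values
instance (n : Int) (k : Int) (values : List Int) (out : Int × List Int) :
    Decidable (Spec_program4B n k values out) := by unfold Spec_program4B; infer_instance

-- ===== CLAIM (what is proved, stated in full; the proofs are below) =====
def Claim_equal_program4B : Prop := ∀ (n : Int) (k : Int) (values : List Int),
  Dom_program4B n k values → Pre_program4B n k values →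
  Spec_program4B n k values (program4B n k values)

-- ===== LEMMAS AND PROOFS =====

theorem pv_getD_append_left (l r : List (Int × List Int)) (j : Int) (d : Int × List Int)
    (h0 : 0 ≤ j) (h1 : j < l.length) :
    PySem.List.pyGetD (l ++ r) j d = PySem.List.pyGetD l j d := by
  rw [PySem.List.pyGetD_eq_getElem (l ++ r) d h0 (by simp; omega),
      PySem.List.pyGetD_eq_getElem l d h0 (by exact_mod_cast h1)]
  exact List.getElem_append_left (by omega)

theorem pv_scanA_append (l r : List (Int × List Int)) (t : Int) (ht : t ≤ l.length) :
    pvScanA (l ++ r) t = pvScanA l t := by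
  unfold pvScanA
  refine PySem.List.foldl_congr_mem _ _ _ _ ?_
  intro acc j hj
  rw [PySem.List.mem_pyRange_one] at hj
  unfold pvStepMaxA
  rw [pv_getD_append_left l r j _ hj.1 (by omega)]

theorem pv_scanA_nil (l : List (Int × List Int)) (t : Int) (ht : t ≤ 0) :
    pvScanA l t = (0, []) := by
  unfold pvScanA
  rw [PySem.List.pyRange_one_eq_nil ht]
  rfl

theorem pv_scanA_succ (l : List (Int × List Int)) (t : Int) (ht : 0 ≤ t) :
    pvScanA l (t + 1) = pvStepMaxA l (pvScanA l t) t := by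
  unfold pvScanA
  rw [PySem.List.pyRange_one_succ_right ht, List.foldl_append]
  rfl

theorem pv_appendB_fst (values : List Int) (i : Int) (dp : List (Int × List Int))
    (best : Int × List Int) :
    (pvAppendB values i dp best).1 = dp ++ [pvResA values dp i best] := by
  unfold pvAppendB pvResA
  split_ifs <;> rfl

theorem pv_resA_append (values : List Int) (dp r : List (Int × List Int)) (ms : Int × List Int) :
    pvResA values (dp ++ r) (dp.length : Int) ms = pvResA values dp (dp.length : Int) ms := by
  unfold pvResA
  by_cases hd : 0 < (dp.length : Int)
  · rw [pv_getD_append_left dp r _ _ (by omega) (by omega)]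
  · rw [if_neg (fun h => hd h.1), if_neg (fun h => hd h.1)]

theorem pv_step (k n : Int) (values : List Int) (dp : List (Int × List Int)) (b : Int × List Int)
    (hk : 0 ≤ k) (hmn : (dp.length : Int) < n)
    (hb : b = pvScanA dp ((dp.length : Int) - k - 1)) :
    (pvBodyB k values (dp, b) dp.length).1.length = dp.length + 1 ∧
    pvBodyA k values (dp ++ List.replicate (n.toNat - dp.length) ((0:Int), ([]:List Int))) dp.length
      = (pvBodyB k values (dp, b) dp.length).1
        ++ List.replicate (n.toNat - (dp.length + 1)) ((0:Int), ([]:List Int)) ∧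
    (pvBodyB k values (dp, b) dp.length).2
      = pvScanA (pvBodyB k values (dp, b) dp.length).1 (((dp.length : Int) + 1) - k - 1) := by
  have hr : n.toNat - dp.length = (n.toNat - (dp.length + 1)) + 1 := by omega
  have hbest : pvScanA dp ((dp.length : Int) - k)
      = (if 0 ≤ (dp.length : Int) - k - 1 ∧
            b.1 < (PySem.List.pyGetD dp ((dp.length : Int) - k - 1) (0, [])).1
         then PySem.List.pyGetD dp ((dp.length : Int) - k - 1) (0, []) else b) := by
    by_cases hj : 0 ≤ (dp.length : Int) - k - 1
    · have h1 : pvScanA dp ((dp.length : Int) - k)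
          = pvStepMaxA dp (pvScanA dp ((dp.length : Int) - k - 1)) ((dp.length : Int) - k - 1) := by
        rw [← pv_scanA_succ dp _ hj]
        norm_num
      rw [h1, ← hb]
      unfold pvStepMaxA
      by_cases hlt : b.1 < (PySem.List.pyGetD dp ((dp.length : Int) - k - 1) (0, [])).1
      · rw [if_pos hlt, if_pos ⟨hj, hlt⟩]
      · rw [if_neg hlt, if_neg (fun h => hlt h.2)]
    · rw [pv_scanA_nil dp _ (by omega), if_neg (fun h => hj h.1), hb,
          pv_scanA_nil dp _ (by omega)]
  refine ⟨?_, ?_, ?_⟩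
  · unfold pvBodyB
    rw [pv_appendB_fst]
    simp
  · unfold pvBodyB pvBodyA
    rw [pv_appendB_fst]
    dsimp only
    rw [pv_scanA_append dp _ _ (by omega), hbest, pv_resA_append]
    rw [PySem.List.pySetD_natCast, List.set_append, if_neg (lt_irrefl _), Nat.sub_self, hr,
        List.replicate_succ, List.set_cons_zero]
    simp
  · have e2 : (pvBodyB k values (dp, b) dp.length).2
        = (if 0 ≤ (dp.length : Int) - k - 1 ∧
              b.1 < (PySem.List.pyGetD dp ((dp.length : Int) - k - 1) (0, [])).1
           then PySem.List.pyGetD dp ((dp.length : Int) - k - 1) (0, []) else b) := rfl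
    rw [e2, ← hbest]
    unfold pvBodyB
    rw [pv_appendB_fst]
    dsimp only
    rw [show ((dp.length : Int) + 1) - k - 1 = (dp.length : Int) - k from by ring]
    rw [pv_scanA_append dp _ _ (by omega)]

theorem pv_invariant (k n : Int) (values : List Int) (hk : 0 ≤ k) :
    ∀ (m : Nat), (m : Int) ≤ n →
    (((PySem.List.pyRange 0 (m : Int) 1).foldl (pvBodyB k values) ([], (0, []))).1.length = m) ∧
    ((PySem.List.pyRange 0 (m : Int) 1).foldl (pvBodyA k values)
        (List.replicate n.toNat ((0 : Int), ([] : List Int)))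
      = ((PySem.List.pyRange 0 (m : Int) 1).foldl (pvBodyB k values) ([], (0, []))).1
        ++ List.replicate (n.toNat - m) ((0 : Int), ([] : List Int))) ∧
    (((PySem.List.pyRange 0 (m : Int) 1).foldl (pvBodyB k values) ([], (0, []))).2
      = pvScanA ((PySem.List.pyRange 0 (m : Int) 1).foldl (pvBodyB k values) ([], (0, []))).1
          ((m : Int) - k - 1)) := by
  intro m
  induction m with
  | zero =>
    intro _
    rw [show ((0 : Nat) : Int) = 0 from rfl, PySem.List.pyRange_one_eq_nil le_rfl]
    refine ⟨rfl, by simp, ?_⟩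
    rw [pv_scanA_nil _ _ (by omega)]
    rfl
  | succ m ih =>
    intro hm
    have hm' : ((m : Nat) : Int) ≤ n := by push_cast at hm ⊢; omega
    obtain ⟨ih1, ih2, ih3⟩ := ih hm'
    have hc : ((m + 1 : Nat) : Int) = ((m : Nat) : Int) + 1 := by push_cast; ring
    rw [hc, PySem.List.pyRange_one_succ_right (by positivity)]
    simp only [List.foldl_append, List.foldl_cons, List.foldl_nil]
    set st := (PySem.List.pyRange 0 ((m : Nat) : Int) 1).foldl (pvBodyB k values) ([], (0, []))
      with hstdef
    rw [ih2]
    have hPair : st = (st.1, st.2) := rfl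
    have hlt : (st.1.length : Int) < n := by rw [ih1]; push_cast at hm; omega
    have hb : st.2 = pvScanA st.1 ((st.1.length : Int) - k - 1) := by rw [ih1]; exact ih3
    obtain ⟨s1, s2, s3⟩ := pv_step k n values st.1 st.2 hk hlt hb
    rw [ih1] at s1 s2 s3
    rw [← hPair] at s1 s2 s3
    exact ⟨s1, s2, s3⟩

-- ===== VERDICT (by name: the statement is the Claim_ definition above) =====
theorem program4B_spec : Claim_equal_program4B := by
  intro n k values _ hpre
  obtain ⟨h1, h2, hk⟩ := hpre
  obtain ⟨i1, i2, i3⟩ := pv_invariant k n values hk n.toNat (by omega)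
  have hpr : PySem.List.pyRange 0 n 1 = PySem.List.pyRange 0 ((n.toNat : Nat) : Int) 1 := by
    rw [Int.toNat_of_nonneg (by omega)]
  unfold Spec_program4B program4B program4B_alt
  dsimp only
  rw [hpr, i2, Nat.sub_self, List.replicate_zero, List.append_nil]
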